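-- pv_equiv track=rewrite | github.com/yogesh-tayo/Tanimylove | amazonques1.py | sortBoxes
-- ===== SOURCE A (Python) =====
-- def sortBoxes(boxList):
--     value1=[]
--     value2=[]
--     for i in boxList:
--         if i.split()[1].isdigit():
--             value2.append(i)
--         else:
--             value1.append(i)
--     value1=sorted(value1,key=lambda x:x.split()[0])
--     value1=sorted(value1,key=lambda x:x.split()[1:])
--     return value1+value2
-- ===== SOURCE B (Python) =====
-- def sortBoxes(boxList):
--     keep = []
--     groups = {}
--     for b in boxList:
--         fields = b.split()
--         if fields[1].isdigit():
--             keep.append(b)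
--         else:
--             groups.setdefault(tuple(fields[1:]), []).append(b)
--     out = []
--     for suffix in sorted(groups):
--         out += sorted(groups[suffix], key=lambda x: x.split()[0])
--     return out + keep
-- ===== Notes on version B (the rewrite author's own statement) =====
-- stated objective: alternative
-- what changed: Replace A's two successive stable comparison sorts of the non-digit entries with a bucket/group-by pass: one loop puts each entry into a dict bucket keyed by its trailing fields, then the bucket keys are sorted and each bucket is sorted by first field only and the buckets are concatenated.
import Mathlib
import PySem

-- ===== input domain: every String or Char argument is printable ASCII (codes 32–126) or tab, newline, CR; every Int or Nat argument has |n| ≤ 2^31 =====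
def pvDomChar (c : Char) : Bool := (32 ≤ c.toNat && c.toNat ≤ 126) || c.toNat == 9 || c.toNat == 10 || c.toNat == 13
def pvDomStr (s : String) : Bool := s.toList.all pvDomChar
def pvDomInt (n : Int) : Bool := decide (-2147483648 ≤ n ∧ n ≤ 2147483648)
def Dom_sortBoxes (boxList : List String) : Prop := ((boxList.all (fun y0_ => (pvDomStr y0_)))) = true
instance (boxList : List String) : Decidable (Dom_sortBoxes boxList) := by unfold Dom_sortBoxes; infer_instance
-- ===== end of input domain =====

-- B replaces A's accumulate-then-double-stable-sort with a group-by pass: a dict of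
-- buckets keyed by the trailing fields, sorted keys, each bucket sorted by first field
-- only, buckets concatenated; objective: alternative.

-- ===== PORT A =====
def sortBoxes (boxList : List String) : List String :=
  let p := boxList.foldl (fun (acc : List String × List String) i =>
    if PySem.Str.strIsdigit ((PySem.List.pyGet? (PySem.Str.split₀ i) 1).getD "") then
      (acc.1, acc.2 ++ [i])
    else (acc.1 ++ [i], acc.2)) ([], [])
  let value1 := PySem.List.sorted p.1 (fun x => (PySem.List.pyGet? (PySem.Str.split₀ x) 0).getD "") false
  let value1 := PySem.List.sorted value1 (fun x => PySem.List.slice (PySem.Str.split₀ x) (some 1) none) false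
  value1 ++ p.2

-- ===== PORT B =====
def sortBoxes_alt (boxList : List String) : List String :=
  let st := boxList.foldl
    (fun (acc : List String × PySem.Dict (List String) (List String)) b =>
      let fields := PySem.Str.split₀ b
      if PySem.Str.strIsdigit ((PySem.List.pyGet? fields 1).getD "") then
        (acc.1 ++ [b], acc.2)
      else
        (acc.1, acc.2.modify (PySem.List.slice fields (some 1) none) [] (· ++ [b])))
    ([], PySem.Dict.empty)
  let out := (PySem.List.sorted st.2.keys (fun k => k) false).foldl
    (fun out suffix => out ++ PySem.List.sorted (st.2.getD suffix [])
      (fun x => (PySem.List.pyGet? (PySem.Str.split₀ x) 0).getD "") false) []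
  out ++ st.1

-- ===== PRECONDITION & SPEC =====
-- Pre_ excludes exactly the strings with fewer than two whitespace-separated fields,
-- on which A raises IndexError (i.split()[1]).
def Pre_sortBoxes (boxList : List String) : Prop :=
  ∀ s ∈ boxList, 2 ≤ (PySem.Str.split₀ s).length
instance (boxList : List String) : Decidable (Pre_sortBoxes boxList) := by
  unfold Pre_sortBoxes; infer_instance
def pvWitness_sortBoxes : List String := ["b 1 c", "a 2x", "c 22"]
def Spec_sortBoxes (boxList : List String) (out : List String) : Prop := out = sortBoxes_alt boxList
instance (boxList : List String) (out : List String) : Decidable (Spec_sortBoxes boxList out) := by unfold Spec_sortBoxes; infer_instance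

-- ===== CLAIM (what is proved, stated in full; the proofs are below) =====
def Claim_equal_sortBoxes : Prop := ∀ (boxList : List String), Dom_sortBoxes boxList → Pre_sortBoxes boxList → Spec_sortBoxes boxList (sortBoxes boxList)

-- ===== LEMMAS AND PROOFS =====

-- insertion sort (PySem's `sorted`) written as a fold, with an explicit comparator
def pvS {α : Type} (before : α → α → Bool) (xs : List α) : List α :=
  xs.foldl (fun acc x => PySem.List.insertBy before x acc) []

-- `<` as elaborated in a plain [LinearOrder] context (the comparison pvBif decides)
def pvLt {κ : Type} [LinearOrder κ] (a b : κ) : Prop := a < b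

-- the boolean comparator of `sorted xs key false`
def pvBif {α κ : Type} [LinearOrder κ] (key : α → κ) : α → α → Bool :=
  fun a b => decide (key a < key b)

-- the two field keys
def pvSuf (x : String) : List String := PySem.List.slice (PySem.Str.split₀ x) (some 1) none
def pvFst (x : String) : String := (PySem.List.pyGet? (PySem.Str.split₀ x) 0).getD ""
def pvDig (x : String) : Bool := PySem.Str.strIsdigit ((PySem.List.pyGet? (PySem.Str.split₀ x) 1).getD "")

theorem pvS_append_singleton {α : Type} (before : α → α → Bool) (l : List α) (x : α) :
    pvS before (l ++ [x]) = PySem.List.insertBy before x (pvS before l) := by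
  simp [pvS]

theorem pvInsertBy_split {α : Type} (before : α → α → Bool) (x : α) (L : List α) :
    PySem.List.insertBy before x L
      = L.takeWhile (fun y => !before x y) ++ x :: L.dropWhile (fun y => !before x y) := by
  induction L with
  | nil => simp [PySem.List.insertBy]
  | cons y ys ih =>
    by_cases h : before x y
    · simp [PySem.List.insertBy, h]
    · simp [PySem.List.insertBy, h, ih]

theorem pvS_eq_sorted {α κ : Type} [LinearOrder κ] (key : α → κ) (xs : List α) :
    pvS (pvBif key) xs = PySem.List.sorted xs key false := by
  rw [PySem.List.sorted_eq_foldl_insertBy]; rfl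

-- sorted with any defeq-LT instance pair equals the insertion-sort fold (Decidable instances are proof-irrelevant)
set_option maxHeartbeats 1000000 in
theorem pvS_eq_sorted' {α κ : Type} [LinearOrder κ] [inst : LT κ] [instD : @DecidableLT κ inst]
    (hLT : ∀ a b : κ, (@LT.lt κ inst a b) ↔ pvLt a b) (key : α → κ) (xs : List α) :
    @PySem.List.sorted α κ inst instD xs key false = pvS (pvBif key) xs := by
  rw [PySem.List.sorted_eq_foldl_insertBy]
  unfold pvS pvBif
  congr 1
  funext acc x
  congr 1
  funext a b
  have h := hLT (key a) (key b)
  simp only [pvLt] at h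
  exact decide_eq_decide.mpr h

theorem pvS_perm {α κ : Type} [LinearOrder κ] (key : α → κ) (xs : List α) :
    (pvS (pvBif key) xs).Perm xs := by
  rw [pvS_eq_sorted]; exact PySem.List.sorted_perm xs key false

theorem pvS_pairwise {α κ : Type} [LinearOrder κ] (key : α → κ) (xs : List α) :
    (pvS (pvBif key) xs).Pairwise (fun a b => key a ≤ key b) := by
  rw [pvS_eq_sorted]; exact PySem.List.sorted_pairwise xs key

theorem pvDrop_gt {α κ : Type} [LinearOrder κ] (key : α → κ) (x : α) (L : List α)
    (hp : L.Pairwise (fun a b => key a ≤ key b)) :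
    ∀ y ∈ L.dropWhile (fun y => !pvBif key x y), key x < key y := by
  induction L with
  | nil => simp
  | cons z L ih =>
    rcases List.pairwise_cons.mp hp with ⟨hz, hp'⟩
    by_cases h : key x < key z
    · intro y hy
      rw [List.dropWhile_cons] at hy
      simp [pvBif, h] at hy
      rcases hy with rfl | hy
      · exact h
      · exact lt_of_lt_of_le h (hz y hy)
    · intro y hy
      rw [List.dropWhile_cons] at hy
      simp only [pvBif, h, decide_false, Bool.not_false, if_true] at hy
      exact ih hp' y hy

-- stability of insertion sort: elements with any fixed key keep their input order
theorem pvS_filter {α κ : Type} [LinearOrder κ] (key : α → κ) (xs : List α) (k : κ) :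
    (pvS (pvBif key) xs).filter (fun a => decide (key a = k))
      = xs.filter (fun a => decide (key a = k)) := by
  induction xs using List.reverseRecOn with
  | nil => simp [pvS]
  | append_singleton l x ih =>
    rw [pvS_append_singleton, pvInsertBy_split]
    have hM : ((pvS (pvBif key) l).takeWhile (fun y => !pvBif key x y)).filter
          (fun a => decide (key a = k))
        ++ ((pvS (pvBif key) l).dropWhile (fun y => !pvBif key x y)).filter
          (fun a => decide (key a = k))
        = (pvS (pvBif key) l).filter (fun a => decide (key a = k)) := by
      rw [← List.filter_append, List.takeWhile_append_dropWhile]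
    by_cases hk : key x = k
    · have hQ : ((pvS (pvBif key) l).dropWhile (fun y => !pvBif key x y)).filter
          (fun a => decide (key a = k)) = [] := by
        rw [List.filter_eq_nil_iff]
        intro a ha
        have hlt := pvDrop_gt key x _ (pvS_pairwise key l) a ha
        simp only [decide_eq_true_eq]
        intro h; rw [← hk] at h; exact absurd h (ne_of_gt hlt)
      rw [hQ, List.append_nil] at hM
      simp [List.filter_append, hk, hQ, hM, ih]
    · simp [List.filter_append, hk]
      rw [hM, ih]

-- pvS_filter, stated for any Boolean test pointwise equal to the key test
theorem pvS_filter' {α κ : Type} [LinearOrder κ] (key : α → κ) (xs : List α) (k : κ)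
    (q : α → Bool) (hq : ∀ a, q a = decide (key a = k)) :
    (pvS (pvBif key) xs).filter q = xs.filter q := by
  rw [List.filter_congr (fun a _ => hq a), List.filter_congr (fun a _ => hq a), pvS_filter]

-- a key-nondecreasing list is determined by its per-key filters
theorem pvUnique {α κ : Type} [LinearOrder κ] (key : α → κ) :
    ∀ (M N : List α), M.Perm N → M.Pairwise (fun a b => key a ≤ key b) →
      N.Pairwise (fun a b => key a ≤ key b) →
      (∀ k, M.filter (fun a => decide (key a = k)) = N.filter (fun a => decide (key a = k))) →
      M = N := by
  intro M
  induction M with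
  | nil =>
    intro N hp _ _ _
    exact hp.nil_eq
  | cons m M' ih =>
    intro N hp h1 h2 hf
    cases N with
    | nil => exact absurd hp.symm.nil_eq (by simp)
    | cons n N' =>
      have hknm : key n ≤ key m := by
        have hmN : m ∈ n :: N' := hp.subset (List.mem_cons_self ..)
        rcases List.mem_cons.mp hmN with h | h
        · rw [h]
        · exact (List.pairwise_cons.mp h2).1 m h
      have hkmn : key m ≤ key n := by
        have hnM : n ∈ m :: M' := hp.symm.subset (List.mem_cons_self ..)
        rcases List.mem_cons.mp hnM with h | h
        · rw [h]
        · exact (List.pairwise_cons.mp h1).1 n h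
      have hkey : key m = key n := le_antisymm hkmn hknm
      have hmn : m = n ∧ M'.filter (fun a => decide (key a = key m))
          = N'.filter (fun a => decide (key a = key m)) := by
        have := hf (key m)
        rw [List.filter_cons, List.filter_cons] at this
        simp only [decide_eq_true_eq, hkey.symm, if_true] at this
        exact ⟨(List.cons.injEq ..).mp this |>.1, (List.cons.injEq ..).mp this |>.2⟩
      obtain ⟨rfl, _⟩ := hmn
      have htails : ∀ k, M'.filter (fun a => decide (key a = k))
          = N'.filter (fun a => decide (key a = k)) := by
        intro k
        have := hf k
        rw [List.filter_cons, List.filter_cons] at this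
        by_cases hk : key m = k
        · simp only [hk, decide_true, if_pos] at this
          simpa using this
        · simpa [hk] using this
      have hperm : M'.Perm N' := hp.cons_inv
      exact congrArg (m :: ·) (ih N' hperm (List.pairwise_cons.mp h1).2
        (List.pairwise_cons.mp h2).2 htails)

theorem pvPairwise_lex {α κ₁ κ₂ : Type} [LinearOrder κ₁] [LinearOrder κ₂]
    (k1 : α → κ₁) (k2 : α → κ₂) (M : List α)
    (h1 : M.Pairwise (fun a b => k1 a ≤ k1 b))
    (h2 : ∀ k, (M.filter (fun a => decide (k1 a = k))).Pairwise (fun a b => k2 a ≤ k2 b)) :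
    M.Pairwise (fun a b => (toLex (k1 a, k2 a)) ≤ toLex (k1 b, k2 b)) := by
  induction M with
  | nil => exact List.Pairwise.nil
  | cons m M' ih =>
    rcases List.pairwise_cons.mp h1 with ⟨h1h, h1t⟩
    refine List.pairwise_cons.mpr ⟨?_, ?_⟩
    · intro b hb
      rcases lt_or_eq_of_le (h1h b hb) with hlt | heq
      · exact Prod.Lex.le_iff.mpr (Or.inl hlt)
      · refine Prod.Lex.le_iff.mpr (Or.inr ⟨heq, ?_⟩)
        have hflt := h2 (k1 m)
        rw [List.filter_cons] at hflt
        simp only [decide_true] at hflt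
        rcases List.pairwise_cons.mp hflt with ⟨hfh, _⟩
        exact hfh b (List.mem_filter.mpr ⟨hb, by simp [heq]⟩)
    · refine ih h1t ?_
      intro k
      have := h2 k
      rw [List.filter_cons] at this
      by_cases hk : k1 m = k
      · simp only [hk, decide_true, if_pos] at this
        exact this.of_cons
      · simpa [hk] using this

-- the two-pass stable sort equals the single composite-key sort
theorem pvStableCompose {α κ₁ κ₂ : Type} [LinearOrder κ₁] [LinearOrder κ₂] [DecidableEq α]
    (k1 : α → κ₁) (k2 : α → κ₂) (xs : List α) :
    pvS (pvBif k1) (pvS (pvBif k2) xs) = pvS (pvBif (fun a => toLex (k1 a, k2 a))) xs := by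
  apply pvUnique (fun a => toLex (k1 a, k2 a))
  · exact ((pvS_perm k1 _).trans (pvS_perm k2 xs)).trans
      (pvS_perm (fun a => toLex (k1 a, k2 a)) xs).symm
  · apply pvPairwise_lex k1 k2 _ (pvS_pairwise k1 _)
    intro k
    rw [pvS_filter]
    exact List.Pairwise.sublist List.filter_sublist (pvS_pairwise k2 xs)
  · exact pvS_pairwise _ xs
  · intro v
    have hq : ∀ (L : List α), L.filter (fun a => decide (toLex (k1 a, k2 a) = v))
        = L.filter (fun a => decide (k1 a = (ofLex v).1) && decide (k2 a = (ofLex v).2)) := by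
      intro L
      apply List.filter_congr
      intro a _
      rw [← Bool.decide_and]
      apply decide_eq_decide.mpr
      constructor
      · intro h
        have h2 : (k1 a, k2 a) = ofLex v := congrArg ofLex h
        exact ⟨congrArg Prod.fst h2, congrArg Prod.snd h2⟩
      · rintro ⟨ha, hb⟩
        have h2 : (k1 a, k2 a) = ((ofLex v).1, (ofLex v).2) := by rw [ha, hb]
        calc toLex (k1 a, k2 a) = toLex ((ofLex v).1, (ofLex v).2) := congrArg toLex h2
          _ = v := rfl
    have hswap : ∀ (L : List α),
        L.filter (fun a => decide (k1 a = (ofLex v).1) && decide (k2 a = (ofLex v).2))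
        = L.filter (fun a => decide (k2 a = (ofLex v).2) && decide (k1 a = (ofLex v).1)) := by
      intro L
      apply List.filter_congr
      intro a _
      exact Bool.and_comm _ _
    rw [hq, hswap, ← List.filter_filter, pvS_filter k1, List.filter_filter, ← hswap,
      ← List.filter_filter, pvS_filter k2, List.filter_filter, pvS_filter, hq, hswap]

-- A's pair-accumulating loop is the two filters
theorem pvPartition {α : Type} (p : α → Bool) (xs : List α) (v1 v2 : List α) :
    xs.foldl (fun (acc : List α × List α) i =>
      if p i then (acc.1, acc.2 ++ [i]) else (acc.1 ++ [i], acc.2)) (v1, v2)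
      = (v1 ++ xs.filter (fun a => !p a), v2 ++ xs.filter p) := by
  induction xs generalizing v1 v2 with
  | nil => simp
  | cons x xs ih =>
    by_cases h : p x
    · simp [h, ih]
    · simp [h, ih]

-- B's grouping loop: the keep list and the bucket dict it builds
def pvBstep (acc : List String × PySem.Dict (List String) (List String)) (b : String) :
    List String × PySem.Dict (List String) (List String) :=
  if pvDig b then (acc.1 ++ [b], acc.2)
  else (acc.1, acc.2.modify (pvSuf b) [] (· ++ [b]))

theorem pvBfold (xs : List String) (keep : List String)
    (d : PySem.Dict (List String) (List String)) :
    xs.foldl pvBstep (keep, d)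
      = (keep ++ xs.filter pvDig,
         (xs.filter (fun b => !pvDig b)).foldl
           (fun d b => d.modify (pvSuf b) [] (· ++ [b])) d) := by
  induction xs generalizing keep d with
  | nil => simp
  | cons x xs ih =>
    by_cases h : pvDig x
    · simp only [List.foldl_cons, List.filter_cons, h, Bool.not_true, pvBstep, if_true,
        Bool.false_eq_true, if_false]
      rw [ih]; simp
    · simp only [List.foldl_cons, List.filter_cons, h, Bool.not_false, pvBstep,
        Bool.false_eq_true, if_false]
      rw [ih]; simp

-- bucket contents: the dict fold groups exactly the suffix-k elements, in order
theorem pvBucket (others : List String) (k : List String) :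
    ((others.foldl (fun d b => d.modify (pvSuf b) [] (· ++ [b]))
        (PySem.Dict.empty : PySem.Dict (List String) (List String))).getD k [])
      = others.filter (fun b => decide (pvSuf b = k)) := by
  have h1 : others.foldl (fun d b => d.modify (pvSuf b) [] (· ++ [b]))
        (PySem.Dict.empty : PySem.Dict (List String) (List String))
      = (others.map (fun b => (pvSuf b, b))).foldl
          (fun d p => d.modify p.1 [] (· ++ [p.2])) PySem.Dict.empty := by
    rw [List.foldl_map]
  rw [h1, PySem.Dict.getD_foldl_modify_append]
  simp only [PySem.Dict.getD_empty, List.nil_append, List.filter_map, List.map_map]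
  rw [show ((fun p => p.2) ∘ fun b => (pvSuf b, b) : String → String) = id from rfl, List.map_id]
  apply List.filter_congr
  intro a _
  exact Bool.beq_eq_decide_eq _ _

-- the minimal key's elements form the first block of a key-nondecreasing list
theorem pvSplitMin {α κ : Type} [LinearOrder κ] (key : α → κ) (k : κ) :
    ∀ (M : List α), M.Pairwise (fun a b => key a ≤ key b) →
      (∀ y ∈ M, key y = k ∨ k < key y) →
      M = M.filter (fun a => decide (key a = k)) ++ M.filter (fun a => !decide (key a = k)) := by
  intro M
  induction M with
  | nil => intro _ _; rfl
  | cons m M' ih =>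
    intro hp hc
    rcases List.pairwise_cons.mp hp with ⟨hm, hp'⟩
    by_cases hk : key m = k
    · have := ih hp' (fun y hy => hc y (List.mem_cons_of_mem _ hy))
      simp only [List.filter_cons, hk, decide_true, Bool.not_true, if_true]
      simpa using this
    · have hkm : k < key m := by
        rcases hc m (List.mem_cons_self ..) with h | h
        · exact absurd h hk
        · exact h
      have hnone : ∀ y ∈ m :: M', ¬ key y = k := by
        intro y hy
        rcases List.mem_cons.mp hy with rfl | hy'
        · exact hk
        · exact fun h => absurd (h ▸ hm y hy') (not_le.mpr hkm)
      have h1 : (m :: M').filter (fun a => decide (key a = k)) = [] := by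
        rw [List.filter_eq_nil_iff]
        intro a ha
        simpa using hnone a ha
      have h2 : (m :: M').filter (fun a => !decide (key a = k)) = m :: M' := by
        rw [List.filter_eq_self]
        intro a ha
        simpa using hnone a ha
      rw [h1, h2, List.nil_append]

-- a key-nondecreasing list is the concatenation of its blocks over sorted distinct keys
theorem pvFlatBlocks {α κ : Type} [LinearOrder κ] (key : α → κ) :
    ∀ (K : List κ) (M : List α), K.Pairwise (· < ·) →
      M.Pairwise (fun a b => key a ≤ key b) →
      (∀ y ∈ M, key y ∈ K) →
      M = K.flatMap (fun k => M.filter (fun a => decide (key a = k))) := by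
  intro K
  induction K with
  | nil =>
    intro M _ _ hc
    cases M with
    | nil => rfl
    | cons m M' => exact absurd (hc m (List.mem_cons_self ..)) (List.not_mem_nil)
  | cons k K' ih =>
    intro M hK hp hc
    rcases List.pairwise_cons.mp hK with ⟨hkK, hK'⟩
    have hsplit := pvSplitMin key k M hp (by
      intro y hy
      rcases List.mem_cons.mp (hc y hy) with h | h
      · exact Or.inl h
      · exact Or.inr (hkK _ h))
    set B := M.filter (fun a => !decide (key a = k)) with hB
    have hBtail : B = K'.flatMap (fun k' => B.filter (fun a => decide (key a = k'))) := by
      apply ih B hK'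
      · exact List.Pairwise.sublist List.filter_sublist hp
      · intro y hy
        rcases List.mem_filter.mp hy with ⟨hyM, hyk⟩
        rcases List.mem_cons.mp (hc y hyM) with h | h
        · exact absurd (by simpa using hyk) (by simp [h])
        · exact h
    have hsame : ∀ k' ∈ K', B.filter (fun a => decide (key a = k'))
        = M.filter (fun a => decide (key a = k')) := by
      intro k' hk'
      rw [hB, List.filter_filter]
      apply List.filter_congr
      intro a _
      by_cases h : key a = k'
      · simp [h]
        exact ne_of_gt (hkK _ hk')
      · simp [h]
    rw [List.flatMap_cons]
    calc M = M.filter (fun a => decide (key a = k)) ++ B := hsplit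
      _ = M.filter (fun a => decide (key a = k))
            ++ K'.flatMap (fun k' => B.filter (fun a => decide (key a = k'))) := by
          rw [← hBtail]
      _ = M.filter (fun a => decide (key a = k))
            ++ K'.flatMap (fun k' => M.filter (fun a => decide (key a = k'))) := by
          congr 1
          exact List.flatMap_congr hsame

-- each bucket, sorted by first field, is the corresponding block of the composite sort
theorem pvGroupSorted (others : List String) (k : List String) :
    pvS (pvBif pvFst) (others.filter (fun b => decide (pvSuf b = k)))
      = (pvS (pvBif (fun a => toLex (pvSuf a, pvFst a))) others).filter
          (fun a => decide (pvSuf a = k)) := by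
  set M := pvS (pvBif (fun a => toLex (pvSuf a, pvFst a))) others with hM
  apply pvUnique pvFst
  · exact ((pvS_perm pvFst _).trans
      ((pvS_perm (fun a => toLex (pvSuf a, pvFst a)) others).filter _).symm)
  · exact pvS_pairwise pvFst _
  · have hlex := pvS_pairwise (fun a => toLex (pvSuf a, pvFst a)) others
    have hsub : (M.filter (fun a => decide (pvSuf a = k))).Pairwise
        (fun a b => toLex (pvSuf a, pvFst a) ≤ toLex (pvSuf b, pvFst b)) :=
      List.Pairwise.sublist List.filter_sublist hlex
    refine List.Pairwise.imp_of_mem ?_ hsub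
    intro a b ha hb hab
    have hka : pvSuf a = k := by simpa using (List.mem_filter.mp ha).2
    have hkb : pvSuf b = k := by simpa using (List.mem_filter.mp hb).2
    rcases Prod.Lex.le_iff.mp hab with h | h
    · rw [hka, hkb] at h
      exact absurd h (lt_irrefl k)
    · exact h.2
  · intro v
    rw [pvS_filter pvFst, List.filter_filter, List.filter_filter]
    have hcong : ∀ (L : List String),
        L.filter (fun a => decide (pvFst a = v) && decide (pvSuf a = k))
        = L.filter (fun a => decide (toLex (pvSuf a, pvFst a) = toLex (k, v))) := by
      intro L
      apply List.filter_congr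
      intro a _
      rw [← Bool.decide_and]
      apply decide_eq_decide.mpr
      constructor
      · rintro ⟨h1, h2⟩
        have : (pvSuf a, pvFst a) = (k, v) := by rw [h1, h2]
        exact congrArg toLex this
      · intro h
        have h2 : (pvSuf a, pvFst a) = (k, v) := congrArg ofLex h
        exact ⟨congrArg Prod.snd h2, congrArg Prod.fst h2⟩
    rw [hcong, hcong, hM]
    exact (pvS_filter' (fun a => toLex (pvSuf a, pvFst a)) others (toLex (k, v)) _
      (fun a => decide_eq_decide.mpr Iff.rfl)).symm

-- core's List LT instance on List String is (defeq to) the Mathlib order used by pvBif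
set_option maxHeartbeats 1000000 in
theorem pvLTlist (a b : List String) : (@LT.lt (List String) List.instLT a b) ↔ pvLt a b := Iff.rfl

-- filters with different Decidable instances for the same predicate are equal
theorem pvDecIrrel {α : Type} (p : α → Prop) (i1 i2 : (a : α) → Decidable (p a)) (L : List α) :
    L.filter (fun a => @decide (p a) (i1 a)) = L.filter (fun a => @decide (p a) (i2 a)) :=
  List.filter_congr (fun _ _ => decide_eq_decide.mpr Iff.rfl)

-- A's two stable sorts collapse to the single composite-key sort
theorem pvAcollapse (others : List String) :
    PySem.List.sorted (PySem.List.sorted others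
        (fun x => (PySem.List.pyGet? (PySem.Str.split₀ x) 0).getD "") false)
      (fun x => PySem.List.slice (PySem.Str.split₀ x) (some 1) none) false
    = pvS (pvBif (fun a => toLex (pvSuf a, pvFst a))) others := by
  rw [pvS_eq_sorted' (inst := List.instLT) (hLT := pvLTlist), ← pvS_eq_sorted]
  exact pvStableCompose
    (k1 := fun x => PySem.List.slice (PySem.Str.split₀ x) (some 1) none)
    (k2 := fun x => (PySem.List.pyGet? (PySem.Str.split₀ x) 0).getD "") others

-- ===== VERDICT (by name: the statement is the Claim_ definition above) =====
set_option maxHeartbeats 4000000 in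
theorem sortBoxes_spec : Claim_equal_sortBoxes := by
  intro boxList _ _
  show sortBoxes boxList = sortBoxes_alt boxList
  unfold sortBoxes sortBoxes_alt
  rw [pvPartition]
  rw [show (fun (acc : List String × PySem.Dict (List String) (List String)) b =>
      let fields := PySem.Str.split₀ b
      if PySem.Str.strIsdigit ((PySem.List.pyGet? fields 1).getD "") then
        (acc.1 ++ [b], acc.2)
      else
        (acc.1, acc.2.modify (PySem.List.slice fields (some 1) none) [] (· ++ [b])))
    = pvBstep from rfl]
  rw [pvBfold]
  simp only [List.nil_append]
  set others := boxList.filter (fun b => !pvDig b) with hoth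
  have hothA : boxList.filter (fun a =>
      !PySem.Str.strIsdigit ((PySem.List.pyGet? (PySem.Str.split₀ a) 1).getD "")) = others := rfl
  have hdigA : boxList.filter (fun i =>
      PySem.Str.strIsdigit ((PySem.List.pyGet? (PySem.Str.split₀ i) 1).getD ""))
      = boxList.filter pvDig := rfl
  rw [hothA, hdigA]
  congr 1
  rw [pvAcollapse]
  set M := pvS (pvBif (fun a => toLex (pvSuf a, pvFst a))) others with hMdef
  set D := others.foldl (fun d b => d.modify (pvSuf b) [] (· ++ [b]))
    (PySem.Dict.empty : PySem.Dict (List String) (List String)) with hDdef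
  have hkeys : D.keys = PySem.Set.ofList (others.map pvSuf) := by
    rw [hDdef, PySem.Dict.keys_foldl_modify_key (key := pvSuf)]
    simp [PySem.Dict.keys_empty, PySem.Set.update_nil_left]
  rw [pvS_eq_sorted' (inst := List.instLT) (hLT := pvLTlist) (key := fun k : List String => k) (xs := D.keys)]
  set K := pvS (pvBif (fun k : List String => k)) D.keys with hKdef
  have hKnodup : K.Nodup := by
    rw [hKdef]
    exact ((pvS_perm (fun k : List String => k) D.keys).nodup_iff).mpr
      (hkeys ▸ PySem.Set.nodup_ofList _)
  have hKlt : K.Pairwise (· < ·) := by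
    have hle : K.Pairwise (fun a b : List String => a ≤ b) := pvS_pairwise _ _
    exact (hle.and hKnodup).imp (fun h => lt_of_le_of_ne h.1 h.2)
  have hcov : ∀ y ∈ M, pvSuf y ∈ K := by
    intro y hy
    have hyo : y ∈ others := (pvS_perm _ others).mem_iff.mp hy
    have hmem : pvSuf y ∈ D.keys := by
      rw [hkeys, PySem.Set.mem_ofList]
      exact List.mem_map_of_mem hyo
    rw [hKdef]
    exact (pvS_perm (fun k : List String => k) D.keys).mem_iff.mpr hmem
  have hMpair : M.Pairwise (fun a b => pvSuf a ≤ pvSuf b) := by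
    refine (pvS_pairwise (fun a => toLex (pvSuf a, pvFst a)) others).imp ?_
    intro a b hab
    rcases Prod.Lex.le_iff.mp hab with h | h
    · exact le_of_lt h
    · exact le_of_eq h.1
  calc M = K.flatMap (fun k => M.filter (fun a => decide (pvSuf a = k))) :=
        (pvFlatBlocks pvSuf K M hKlt hMpair hcov).trans
          (List.flatMap_congr (fun k _ => pvDecIrrel _ _ _ M))
    _ = K.foldl (fun out suffix => out ++ PySem.List.sorted (D.getD suffix [])
          (fun x => (PySem.List.pyGet? (PySem.Str.split₀ x) 0).getD "") false) [] := by
        rw [PySem.List.foldl_append_eq_flatMap, List.nil_append]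
        apply List.flatMap_congr
        intro k _
        rw [hDdef, pvBucket, ← pvS_eq_sorted]
        exact (pvGroupSorted others k).symm
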